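-- pv_equiv track=rewrite | github.com/qablito/bnk4 | engine/features/key_mode_v1.py | _ordered_reason_codes
-- ===== SOURCE A (Python) =====
-- _REASON_CODE_ORDER = [
--     "omitted_ambiguous_runnerup",
--     "omitted_low_confidence",
--     "emit_confident",
-- ]
--
-- def _ordered_reason_codes(codes: list[str]) -> list[str]:
--     seen = set()
--     out: list[str] = []
--     for c in _REASON_CODE_ORDER:
--         if c in codes and c not in seen:
--             seen.add(c)
--             out.append(c)
--     for c in sorted(codes):
--         if c not in seen:
--             out.append(c)
--             seen.add(c)
--     return out
-- ===== SOURCE B (Python) =====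
-- _REASON_CODE_ORDER = [
--     "omitted_ambiguous_runnerup",
--     "omitted_low_confidence",
--     "emit_confident",
-- ]
--
-- def _ordered_reason_codes(codes: list[str]) -> list[str]:
--     idx = {c: i for i, c in enumerate(_REASON_CODE_ORDER)}
--     return sorted(set(codes), key=lambda c: (idx.get(c, len(_REASON_CODE_ORDER)), c))
-- ===== Notes on version B (the rewrite author's own statement) =====
-- stated objective: idiomatic
-- what changed: Replaces the two seen-set accumulation loops with a single sorted(set(codes), key=...) call whose key ranks known codes by their priority index and unknown codes after them alphabetically.
import Mathlib
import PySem

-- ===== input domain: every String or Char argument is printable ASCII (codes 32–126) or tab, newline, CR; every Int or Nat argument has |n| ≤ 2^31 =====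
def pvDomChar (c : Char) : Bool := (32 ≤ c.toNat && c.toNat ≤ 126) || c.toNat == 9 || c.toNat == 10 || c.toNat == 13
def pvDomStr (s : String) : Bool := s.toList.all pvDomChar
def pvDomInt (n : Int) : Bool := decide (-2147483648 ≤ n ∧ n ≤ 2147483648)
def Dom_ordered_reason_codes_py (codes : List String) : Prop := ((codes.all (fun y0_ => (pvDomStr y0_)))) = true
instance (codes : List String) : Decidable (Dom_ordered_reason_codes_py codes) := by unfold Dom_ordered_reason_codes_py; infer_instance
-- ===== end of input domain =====

-- B replaces A's two seen-set accumulation loops by one sorted(set(codes), key=...) call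
-- (known codes keyed by their priority index, unknown ones keyed after them alphabetically); idiomatic, same cost.

def pvReasonCodeOrder : List String :=
  ["omitted_ambiguous_runnerup", "omitted_low_confidence", "emit_confident"]

-- ===== PORT A =====
-- seen = set(); out = []
-- for c in _REASON_CODE_ORDER: if c in codes and c not in seen: seen.add(c); out.append(c)
-- for c in sorted(codes): if c not in seen: out.append(c); seen.add(c)
def ordered_reason_codes_py (codes : List String) : List String :=
  ((PySem.List.sorted codes (fun c => c) false).foldl
      (fun (st : PySem.Set String × List String) c =>
        if !(PySem.Set.contains st.1 c) then (PySem.Set.add st.1 c, st.2 ++ [c]) else st)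
      (pvReasonCodeOrder.foldl
        (fun (st : PySem.Set String × List String) c =>
          if codes.contains c && !(PySem.Set.contains st.1 c) then
            (PySem.Set.add st.1 c, st.2 ++ [c])
          else st)
        (PySem.Set.empty, []))).2

-- ===== PORT B =====
-- idx = {c: i for i, c in enumerate(_REASON_CODE_ORDER)}
-- return sorted(set(codes), key=lambda c: (idx.get(c, len(_REASON_CODE_ORDER)), c))
def ordered_reason_codes_py_alt (codes : List String) : List String :=
  let idx : PySem.Dict String Int :=
    (PySem.List.enumerate pvReasonCodeOrder).foldl
      (fun d p => PySem.Dict.insert d p.2 p.1) PySem.Dict.empty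
  PySem.List.sorted2 (PySem.Set.ofList codes)
    (fun c => PySem.Dict.getD idx c (pvReasonCodeOrder.length : Int))
    (fun c => c) false

-- ===== PRECONDITION & SPEC =====
def Spec_ordered_reason_codes_py (codes : List String) (out : List String) : Prop := out = ordered_reason_codes_py_alt codes
instance (codes : List String) (out : List String) : Decidable (Spec_ordered_reason_codes_py codes out) := by unfold Spec_ordered_reason_codes_py; infer_instance

-- ===== CLAIM (what is proved, stated in full; the proofs are below) =====
def Claim_equal_ordered_reason_codes_py : Prop := ∀ (codes : List String), Dom_ordered_reason_codes_py codes → Spec_ordered_reason_codes_py codes (ordered_reason_codes_py codes)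

-- ===== LEMMAS AND PROOFS =====

-- rank of a code under B's key: priority index for known codes, 3 for unknown ones
def pvRank (c : String) : Int :=
  if c = "omitted_ambiguous_runnerup" then 0
  else if c = "omitted_low_confidence" then 1
  else if c = "emit_confident" then 2 else 3

def pvKey (c : String) : Lex (Int × String) := toLex (pvRank c, c)

-- the codes A's first loop emits (and records in `seen`)
def pvSel (codes seen : List String) : List String → List String
  | [] => []
  | c :: t =>
      if codes.contains c && !(List.contains seen c) then c :: pvSel codes (seen ++ [c]) t
      else pvSel codes seen t

-- the codes A's second loop emits: first occurrences not yet seen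
def pvDedup (seen : List String) : List String → List String
  | [] => []
  | c :: t => if List.contains seen c then pvDedup seen t else c :: pvDedup (seen ++ [c]) t

theorem pvSel_foldl (codes : List String) : ∀ (ks s o : List String),
    ks.foldl
      (fun (st : PySem.Set String × List String) c =>
        if codes.contains c && !(PySem.Set.contains st.1 c) then
          (PySem.Set.add st.1 c, st.2 ++ [c])
        else st) (s, o)
    = (s ++ pvSel codes s ks, o ++ pvSel codes s ks) := by
  intro ks
  induction ks with
  | nil => intro s o; simp [pvSel]
  | cons c t ih =>
      intro s o
      simp only [List.foldl_cons]
      by_cases h : codes.contains c && !(List.contains s c)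
      · have hcm : c ∉ s := by
          rcases Bool.and_eq_true_iff.mp h with ⟨_, h2⟩
          simpa using h2
        rw [if_pos (show (codes.contains c && !(PySem.Set.contains s c)) = true from h)]
        rw [show PySem.Set.add s c = s ++ [c] from by
          simp [PySem.Set.add, PySem.Set.contains, hcm]]
        rw [ih]
        simp only [pvSel]
        rw [if_pos h]
        simp
      · rw [if_neg (show ¬ (codes.contains c && !(PySem.Set.contains s c)) = true from h), ih]
        simp only [pvSel]
        rw [if_neg h]

theorem pvDedup_foldl : ∀ (l s o : List String),
    l.foldl
      (fun (st : PySem.Set String × List String) c =>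
        if !(PySem.Set.contains st.1 c) then (PySem.Set.add st.1 c, st.2 ++ [c]) else st)
      (s, o)
    = (s ++ pvDedup s l, o ++ pvDedup s l) := by
  intro l
  induction l with
  | nil => intro s o; simp [pvDedup]
  | cons c t ih =>
      intro s o
      simp only [List.foldl_cons]
      by_cases h : List.contains s c
      · have hm : c ∈ s := List.mem_of_elem_eq_true h
        rw [if_neg (show ¬ (!(PySem.Set.contains s c)) = true from by
          simp [PySem.Set.contains, hm])]
        rw [ih]
        simp only [pvDedup]
        rw [if_pos h]
      · have hcm : c ∉ s := fun hm => h (List.elem_eq_true_of_mem hm)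
        have hc : (!(List.contains s c)) = true := by simp [hcm]
        rw [if_pos (show (!(PySem.Set.contains s c)) = true from hc)]
        rw [show PySem.Set.add s c = s ++ [c] from by
          simp [PySem.Set.add, PySem.Set.contains, hcm]]
        rw [ih]
        simp only [pvDedup]
        rw [if_neg (show ¬ (List.contains s c) = true from h)]
        simp

theorem mem_pvSel (codes : List String) : ∀ (ks s : List String) (x : String),
    x ∈ pvSel codes s ks ↔ x ∈ ks ∧ x ∈ codes ∧ x ∉ s := by
  intro ks
  induction ks with
  | nil => intro s x; simp [pvSel]
  | cons c t ih =>
      intro s x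
      simp only [pvSel]
      by_cases h : codes.contains c && !(List.contains s c)
      · rcases Bool.and_eq_true_iff.mp h with ⟨h1, h2⟩
        have hc : c ∈ codes := by simpa using h1
        have hs : c ∉ s := by simpa using h2
        rw [if_pos h]
        simp only [List.mem_cons, ih]
        constructor
        · rintro (rfl | ⟨ht, hcod, hns⟩)
          · exact ⟨Or.inl rfl, hc, hs⟩
          · exact ⟨Or.inr ht, hcod, fun hx => hns (by simp [hx])⟩
        · rintro ⟨(rfl | ht), hcod, hns⟩
          · exact Or.inl rfl
          · by_cases hxc : x = c
            · exact Or.inl hxc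
            · exact Or.inr ⟨ht, hcod, by simp [hns, hxc]⟩
      · rw [if_neg h]
        simp only [ih, List.mem_cons]
        constructor
        · rintro ⟨ht, hcod, hns⟩; exact ⟨Or.inr ht, hcod, hns⟩
        · rintro ⟨(rfl | ht), hcod, hns⟩
          · exfalso
            apply h
            simp only [Bool.and_eq_true, Bool.not_eq_true']
            exact ⟨by simpa using hcod, by simpa using hns⟩
          · exact ⟨ht, hcod, hns⟩

theorem pvSel_sublist (codes : List String) : ∀ (ks s : List String),
    (pvSel codes s ks).Sublist ks := by
  intro ks
  induction ks with
  | nil => intro s; simp [pvSel]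
  | cons c t ih =>
      intro s
      simp only [pvSel]
      by_cases h : codes.contains c && !(List.contains s c)
      · rw [if_pos h]; exact List.Sublist.cons₂ c (ih (s ++ [c]))
      · rw [if_neg h]; exact List.Sublist.cons c (ih s)

theorem mem_pvDedup : ∀ (l s : List String) (x : String),
    x ∈ pvDedup s l ↔ x ∈ l ∧ x ∉ s := by
  intro l
  induction l with
  | nil => intro s x; simp [pvDedup]
  | cons c t ih =>
      intro s x
      simp only [pvDedup]
      by_cases h : List.contains s c
      · have hc : c ∈ s := by simpa using h
        rw [if_pos h]
        simp only [ih, List.mem_cons]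
        constructor
        · rintro ⟨ht, hns⟩; exact ⟨Or.inr ht, hns⟩
        · rintro ⟨(rfl | ht), hns⟩
          · exact absurd hc hns
          · exact ⟨ht, hns⟩
      · have hcns : c ∉ s := by simpa using h
        rw [if_neg h]
        simp only [List.mem_cons, ih]
        constructor
        · rintro (rfl | ⟨ht, hns⟩)
          · exact ⟨Or.inl rfl, hcns⟩
          · exact ⟨Or.inr ht, fun hx => hns (by simp [hx])⟩
        · rintro ⟨(rfl | ht), hns⟩
          · exact Or.inl rfl
          · by_cases hxc : x = c
            · exact Or.inl hxc
            · exact Or.inr ⟨ht, by simp [hns, hxc]⟩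

theorem pvDedup_pairwise : ∀ (l : List String),
    l.Pairwise (fun a b => a ≤ b) → ∀ s, (pvDedup s l).Pairwise (fun a b => a < b) := by
  intro l
  induction l with
  | nil => intro _ s; simp [pvDedup]
  | cons c t ih =>
      intro hp s
      rcases List.pairwise_cons.mp hp with ⟨hr, ht⟩
      simp only [pvDedup]
      by_cases h : List.contains s c
      · rw [if_pos h]; exact ih ht s
      · rw [if_neg h]
        refine List.pairwise_cons.mpr ⟨?_, ih ht (s ++ [c])⟩
        intro y hy
        rcases (mem_pvDedup t (s ++ [c]) y).mp hy with ⟨hyt, hys⟩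
        have hne : y ≠ c := fun hx => hys (by simp [hx])
        exact lt_of_le_of_ne (hr y hyt) (Ne.symm hne)

-- B's tuple key as a single lexicographic key
theorem sorted2_eq_sorted_lex (xs : List String) (k1 : String → Int) :
    PySem.List.sorted2 xs k1 (fun c => c) false
      = PySem.List.sorted xs (fun c => toLex (k1 c, c)) false := by
  rw [PySem.List.sorted_eq_foldl_insertBy]
  have hbef : (fun a b : String => decide (k1 a < k1 b) || (!decide (k1 b < k1 a) && decide (a < b)))
      = (fun a b : String => decide (toLex (k1 a, a) < toLex (k1 b, b))) := by
    funext a b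
    rcases lt_trichotomy (k1 a) (k1 b) with h | h | h
    · simp [h, Prod.Lex.lt_iff, asymm h]
    · simp [h, Prod.Lex.lt_iff]
    · simp [asymm h, h, Prod.Lex.lt_iff, ne_of_gt h]
  simp only [PySem.List.sorted2, Bool.false_eq_true, if_false, hbef]

theorem pvRank_getD (c : String) :
    PySem.Dict.getD
      ((PySem.List.enumerate pvReasonCodeOrder).foldl
        (fun d p => PySem.Dict.insert d p.2 p.1) PySem.Dict.empty) c (pvReasonCodeOrder.length : Int)
    = pvRank c := by
  have hidx : (PySem.List.enumerate pvReasonCodeOrder).foldl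
      (fun (d : PySem.Dict String Int) p => PySem.Dict.insert d p.2 p.1) PySem.Dict.empty
      = PySem.Dict.mk [("omitted_ambiguous_runnerup", (0:Int)), ("omitted_low_confidence", 1), ("emit_confident", 2)] := by
    decide
  rw [hidx]
  by_cases h0 : c = "omitted_ambiguous_runnerup"
  · simp [PySem.Dict.getD, PySem.Dict.get?, h0, pvRank]
  · by_cases h1 : c = "omitted_low_confidence"
    · simp [PySem.Dict.getD, PySem.Dict.get?, h1, pvRank]
    · by_cases h2 : c = "emit_confident"
      · simp [PySem.Dict.getD, PySem.Dict.get?, h2, pvRank]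
      · simp [PySem.Dict.getD, PySem.Dict.get?, h0, h1, h2, pvRank, pvReasonCodeOrder,
          Ne.symm h0, Ne.symm h1, Ne.symm h2]

theorem pvRank_lt_three_of_mem (c : String) (h : c ∈ pvReasonCodeOrder) : pvRank c < 3 := by
  simp only [pvReasonCodeOrder, List.mem_cons] at h
  rcases h with rfl | rfl | rfl | h
  · simp [pvRank]
  · simp [pvRank]
  · simp [pvRank]
  · simp at h

theorem pvRank_eq_three_of_not_mem (c : String) (h : c ∉ pvReasonCodeOrder) : pvRank c = 3 := by
  simp only [pvReasonCodeOrder, List.mem_cons, not_or] at h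
  simp [pvRank, h.1, h.2.1, h.2.2.1]

-- A's output, in closed form
theorem portA_eq (codes : List String) :
    ordered_reason_codes_py codes
      = pvSel codes [] pvReasonCodeOrder
        ++ pvDedup (pvSel codes [] pvReasonCodeOrder)
             (PySem.List.sorted codes (fun c => c) false) := by
  unfold ordered_reason_codes_py
  rw [pvSel_foldl, pvDedup_foldl]
  simp

theorem portA_mem (codes : List String) (x : String) :
    x ∈ ordered_reason_codes_py codes ↔ x ∈ codes := by
  rw [portA_eq]
  simp only [List.mem_append, mem_pvDedup, PySem.List.mem_sorted]
  constructor
  · rintro (h | ⟨h, _⟩)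
    · exact ((mem_pvSel codes pvReasonCodeOrder [] x).mp h).2.1
    · exact h
  · intro h
    by_cases hs : x ∈ pvSel codes [] pvReasonCodeOrder
    · exact Or.inl hs
    · exact Or.inr ⟨h, hs⟩

theorem portA_nodup (codes : List String) : (ordered_reason_codes_py codes).Nodup := by
  rw [portA_eq]
  refine List.nodup_append.mpr ⟨?_, ?_, ?_⟩
  · exact (pvSel_sublist codes pvReasonCodeOrder []).nodup (by decide)
  · exact (pvDedup_pairwise _ (PySem.List.sorted_pairwise codes (fun c => c)) _).imp
      (fun h => ne_of_lt h)
  · intro x hx y hy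
    rcases (mem_pvDedup _ _ y).mp hy with ⟨_, hns⟩
    exact fun hxy => hns (hxy ▸ hx)

theorem portA_pairwise (codes : List String) :
    (ordered_reason_codes_py codes).Pairwise (fun a b => pvKey a < pvKey b) := by
  rw [portA_eq]
  refine List.pairwise_append.mpr ⟨?_, ?_, ?_⟩
  · -- the selected known codes keep priority order
    refine List.Pairwise.sublist (pvSel_sublist codes pvReasonCodeOrder []) ?_
    have h01 : pvKey "omitted_ambiguous_runnerup" < pvKey "omitted_low_confidence" :=
      Prod.Lex.lt_iff.mpr (Or.inl (by simp [pvKey, pvRank]))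
    have h02 : pvKey "omitted_ambiguous_runnerup" < pvKey "emit_confident" :=
      Prod.Lex.lt_iff.mpr (Or.inl (by simp [pvKey, pvRank]))
    have h12 : pvKey "omitted_low_confidence" < pvKey "emit_confident" :=
      Prod.Lex.lt_iff.mpr (Or.inl (by simp [pvKey, pvRank]))
    simp only [pvReasonCodeOrder]
    refine List.pairwise_cons.mpr ⟨?_, List.pairwise_cons.mpr ⟨?_,
      List.pairwise_cons.mpr ⟨?_, List.Pairwise.nil⟩⟩⟩
    · intro y hy
      rcases List.mem_cons.mp hy with rfl | hy
      · exact h01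
      rcases List.mem_cons.mp hy with rfl | hy
      · exact h02
      simp at hy
    · intro y hy
      rcases List.mem_cons.mp hy with rfl | hy
      · exact h12
      simp at hy
    · intro y hy
      simp at hy
  · -- the unknown codes, alphabetically
    refine (pvDedup_pairwise _ (PySem.List.sorted_pairwise codes (fun c => c)) _).imp_of_mem ?_
    intro a b ha hb hab
    have hka : pvRank a = 3 := by
      rcases (mem_pvDedup _ _ a).mp ha with ⟨hal, hans⟩
      refine pvRank_eq_three_of_not_mem a fun hmem => hans ?_
      exact (mem_pvSel codes pvReasonCodeOrder [] a).mpr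
        ⟨hmem, (PySem.List.mem_sorted codes (fun c => c) false a).mp hal, by simp⟩
    have hkb : pvRank b = 3 := by
      rcases (mem_pvDedup _ _ b).mp hb with ⟨hbl, hbns⟩
      refine pvRank_eq_three_of_not_mem b fun hmem => hbns ?_
      exact (mem_pvSel codes pvReasonCodeOrder [] b).mpr
        ⟨hmem, (PySem.List.mem_sorted codes (fun c => c) false b).mp hbl, by simp⟩
    exact Prod.Lex.lt_iff.mpr (Or.inr (by simp [pvKey, hka, hkb, hab]))
  · -- every known code sorts before every unknown one
    intro a ha b hb
    rcases (mem_pvSel codes pvReasonCodeOrder [] a).mp ha with ⟨haK, _, _⟩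
    rcases (mem_pvDedup _ _ b).mp hb with ⟨hbl, hbns⟩
    have hkb : pvRank b = 3 := by
      refine pvRank_eq_three_of_not_mem b fun hmem => hbns ?_
      exact (mem_pvSel codes pvReasonCodeOrder [] b).mpr
        ⟨hmem, (PySem.List.mem_sorted codes (fun c => c) false b).mp hbl, by simp⟩
    refine Prod.Lex.lt_iff.mpr (Or.inl ?_)
    simp only [pvKey, ofLex_toLex]
    have := pvRank_lt_three_of_mem a haK
    omega

-- ===== VERDICT (by name: the statement is the Claim_ definition above) =====
theorem ordered_reason_codes_py_spec : Claim_equal_ordered_reason_codes_py := by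
  intro codes _
  unfold Spec_ordered_reason_codes_py ordered_reason_codes_py_alt
  rw [sorted2_eq_sorted_lex]
  have hkey : (fun c => toLex (PySem.Dict.getD
      ((PySem.List.enumerate pvReasonCodeOrder).foldl
        (fun d p => PySem.Dict.insert d p.2 p.1) PySem.Dict.empty) c (pvReasonCodeOrder.length : Int), c))
      = pvKey := by
    funext c
    rw [pvRank_getD]
    rfl
  rw [hkey]
  refine (PySem.List.sorted_eq_of_perm_of_pairwise_lt _ _ pvKey ?_ (portA_pairwise codes)).symm
  refine (List.perm_ext_iff_of_nodup (portA_nodup codes) (PySem.Set.nodup_ofList codes)).mpr ?_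
  intro a
  rw [portA_mem, PySem.Set.mem_ofList]
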